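-- pv_equiv track=rewrite | github.com/PauloHSNeto/Ciencia-de-Computa-o-CourseEra | Elefantes.py | elefantes
-- ===== SOURCE A (Python) =====
-- def incomodam(n):
--     if n<1:
--         return ""
--     else:
--         incomodam(n-1)
--         return"incomodam "*n
--
-- def elefantes(n):
--     if n < 1:
--         return ""
--
--     if n<2:
--      return "Um elefante incomoda muita gente\n"
--     elefantes(n - 1)
--
--     if n >= 2:
--
--         return elefantes(n - 1) + str(n) + " elefantes " + incomodam(n) +"muito mais\n" + str(n) + " elefantes incomodam muita gente\n"
-- ===== SOURCE B (Python) =====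
-- def elefantes(n):
--     if n < 1:
--         return ""
--     parts = ["Um elefante incomoda muita gente\n"]
--     for k in range(2, n + 1):
--         parts.append(str(k) + " elefantes " + "incomodam " * k + "muito mais\n"
--                      + str(k) + " elefantes incomodam muita gente\n")
--     return "".join(parts)
-- ===== Notes on version B (the rewrite author's own statement) =====
-- stated objective: faster
-- what changed: Replaced A's exponential double recursion (two recursive elefantes(n-1) calls per level plus a dead incomodam recursion) with a single iterative loop appending one verse per k; intended as faster (measured: A timed out at n=16 where B returned, so no same-size ratio was readable). Pre_ excludes only n >= 997, where A raises RecursionError.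
import Mathlib
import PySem

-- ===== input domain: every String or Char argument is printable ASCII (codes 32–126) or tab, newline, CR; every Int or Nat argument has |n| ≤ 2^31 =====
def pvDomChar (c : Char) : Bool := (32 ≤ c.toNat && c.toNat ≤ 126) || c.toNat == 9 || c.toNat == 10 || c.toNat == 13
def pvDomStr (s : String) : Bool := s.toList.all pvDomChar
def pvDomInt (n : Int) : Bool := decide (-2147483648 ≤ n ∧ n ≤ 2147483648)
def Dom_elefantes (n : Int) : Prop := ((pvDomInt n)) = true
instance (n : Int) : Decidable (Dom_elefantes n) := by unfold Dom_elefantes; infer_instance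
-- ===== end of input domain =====

-- B replaces A's exponential double recursion (elefantes(n-1) called twice per level, plus a dead
-- incomodam recursion) by a single iterative pass appending one verse per k; asymptotically faster.

-- ===== PORT A =====
-- strings are handled as List Char (PySem.Chars); "incomodam " * n = PySem.List.pyRepeat
def incomodamChars (n : Int) : List Char :=
  if n < 1 then []
  else
    let _ := incomodamChars (n - 1)   -- A's dead recursive call, kept literally
    PySem.List.pyRepeat "incomodam ".toList n
termination_by n.toNat
decreasing_by omega

def elefantesChars (n : Int) : List Char :=
  if n < 1 then []
  else if n < 2 then "Um elefante incomoda muita gente\n".toList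
  else
    let _ := elefantesChars (n - 1)   -- A's dead recursive call, kept literally
    elefantesChars (n - 1) ++ (PySem.Int.toChars n) ++ " elefantes ".toList
      ++ incomodamChars n ++ "muito mais\n".toList
      ++ (PySem.Int.toChars n) ++ " elefantes incomodam muita gente\n".toList
termination_by n.toNat
decreasing_by all_goals omega

def elefantes (n : Int) : String := String.ofList (elefantesChars n)

-- ===== PORT B =====
def verseChars (k : Int) : List Char :=
  (PySem.Int.toChars k) ++ " elefantes ".toList ++ PySem.List.pyRepeat "incomodam ".toList k
    ++ "muito mais\n".toList ++ (PySem.Int.toChars k) ++ " elefantes incomodam muita gente\n".toList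

def elefantes_alt (n : Int) : String :=
  if n < 1 then ""
  else
    String.ofList ((PySem.List.pyRange 2 (n + 1) 1).foldl
      (fun acc k => acc ++ verseChars k) "Um elefante incomoda muita gente\n".toList)

-- ===== PRECONDITION & SPEC =====
-- Pre_ excludes exactly n >= 997: there A's recursion depth (n, reached depth-first through its
-- dead recursive call) exceeds Python's default recursion limit and A raises RecursionError.
def Pre_elefantes (n : Int) : Prop := n < 997
instance (n : Int) : Decidable (Pre_elefantes n) := by unfold Pre_elefantes; infer_instance
def pvWitness_elefantes : Int := 5

def Spec_elefantes (n : Int) (out : String) : Prop := out = elefantes_alt n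
instance (n : Int) (out : String) : Decidable (Spec_elefantes n out) := by unfold Spec_elefantes; infer_instance

-- ===== CLAIM (what is proved, stated in full; the proofs are below) =====
def Claim_equal_elefantes : Prop := ∀ (n : Int), Dom_elefantes n → Pre_elefantes n → Spec_elefantes n (elefantes n)

-- ===== LEMMAS AND PROOFS =====
theorem altChars_eq (n : Int) :
    (PySem.List.pyRange 2 (n + 1) 1).foldl (fun acc k => acc ++ verseChars k)
      "Um elefante incomoda muita gente\n".toList
    = "Um elefante incomoda muita gente\n".toList
        ++ (PySem.List.pyRange 2 (n + 1) 1).flatMap verseChars :=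
  PySem.List.foldl_append_eq_flatMap _ _ _

theorem incomodamChars_eq (n : Int) (h : ¬ n < 1) :
    incomodamChars n = PySem.List.pyRepeat "incomodam ".toList n := by
  rw [incomodamChars]; simp [h]

theorem elefantesChars_closed : ∀ (m : Nat) (n : Int), n.toNat = m →
    elefantesChars n =
      if n < 1 then []
      else "Um elefante incomoda muita gente\n".toList
        ++ (PySem.List.pyRange 2 (n + 1) 1).flatMap verseChars := by
  intro m
  induction m using Nat.strong_induction_on with
  | _ m ih =>
    intro n hm
    by_cases h1 : n < 1
    · rw [elefantesChars]; simp [h1]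
    · by_cases h2 : n < 2
      · rw [elefantesChars]
        simp only [h1, h2, if_true, if_false]
        have : n + 1 ≤ 2 := by omega
        rw [PySem.List.pyRange_one_eq_nil this]
        simp
      · rw [elefantesChars]
        simp only [h1, h2, if_false]
        have hrec : elefantesChars (n - 1) =
            if n - 1 < 1 then []
            else "Um elefante incomoda muita gente\n".toList
              ++ (PySem.List.pyRange 2 (n - 1 + 1) 1).flatMap verseChars := by
          exact ih (n - 1).toNat (by omega) (n - 1) rfl
        have hsplit : PySem.List.pyRange 2 (n + 1) 1
            = PySem.List.pyRange 2 n 1 ++ [n] := by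
          exact PySem.List.pyRange_one_succ_right (a := 2) (b := n) (by omega)
        rw [hrec, hsplit]
        have hne : ¬ (n - 1 < 1) := by omega
        simp only [hne, if_false]
        have : n - 1 + 1 = n := by omega
        rw [this, incomodamChars_eq n h1]
        simp [verseChars, List.flatMap_append, List.append_assoc]

theorem elefantesChars_eq_alt (n : Int) :
    elefantes n = elefantes_alt n := by
  by_cases h1 : n < 1
  · rw [elefantes, elefantes_alt, elefantesChars_closed n.toNat n rfl]
    simp [h1]
  · rw [elefantes, elefantes_alt, elefantesChars_closed n.toNat n rfl,
      altChars_eq n]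
    simp [h1]

-- ===== VERDICT (by name: the statement is the Claim_ definition above) =====
theorem elefantes_spec : Claim_equal_elefantes := by
  intro n _ _
  unfold Spec_elefantes
  exact elefantesChars_eq_alt n
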